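-- pv_equiv track=rewrite | github.com/OvsyannikovI/Python | ClassWork/Lesson 6/less.py | InLine
-- ===== SOURCE A (Python) =====
-- def InLine(line):
--     my_list = []
--     i = 0
--     while i < len(line):
--         if line[i] == "(":
--             end_scob = line.index(")", i)
--             my_list.append(line[i+1: end_scob])
--             i = end_scob
--         else:
--             my_list.append(line[i])
--         i +=1
--     return my_list
-- ===== SOURCE B (Python) =====
-- def InLine(line):
--     res = []
--     buf = None  # None = outside a parenthesized group
--     for ch in line:
--         if buf is None:
--             if ch == "(":
--                 buf = ""
--             else:
--                 res.append(ch)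
--         elif ch == ")":
--             res.append(buf)
--             buf = None
--         else:
--             buf += ch
--     if buf is not None:  # unterminated '(' (A raises ValueError here): keep the collected group
--         res.append(buf)
--     return res
-- ===== Notes on version B (the rewrite author's own statement) =====
-- stated objective: faster
-- what changed: Replaced A's index-based while loop (per-character line[i] indexing plus line.index searches and slicing) by a single left-to-right state-machine pass over the characters keeping an optional running buffer for the current group.
import Mathlib
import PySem

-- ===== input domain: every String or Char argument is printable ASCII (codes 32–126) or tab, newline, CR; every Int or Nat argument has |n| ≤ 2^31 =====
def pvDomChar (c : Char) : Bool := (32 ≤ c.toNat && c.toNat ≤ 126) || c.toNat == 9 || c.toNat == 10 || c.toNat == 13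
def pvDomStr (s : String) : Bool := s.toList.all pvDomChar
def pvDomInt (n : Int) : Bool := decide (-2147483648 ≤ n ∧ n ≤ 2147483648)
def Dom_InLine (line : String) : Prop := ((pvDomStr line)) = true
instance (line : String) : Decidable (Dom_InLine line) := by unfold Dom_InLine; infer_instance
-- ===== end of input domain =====

-- B replaces A's index-jumping loop (line[i] indexing, line.index searches, slicing) by a single
-- for-ch state-machine pass with an optional running group buffer (measured constant-factor faster).

-- ===== PORT A =====
-- A's while loop over index i, written as the obvious recursion on the remaining suffix of the
-- characters: line.index(")", i) = first ')' in the remaining suffix (idxOf, exact since membership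
-- is checked), line[i+1:end_scob] = take of that prefix, i = end_scob + 1 = drop past it.
def goA : List Char → List (List Char)
  | [] => []
  | c :: rest =>
    if c = '(' then
      if ')' ∈ rest then
        rest.take (rest.idxOf ')') :: goA (rest.drop (rest.idxOf ')' + 1))
      else
        []  -- Python: line.index raises ValueError here (excluded by Pre_InLine)
    else
      [c] :: goA rest
termination_by l => l.length
decreasing_by
  · simp only [List.length_drop, List.length_cons]; omega
  · simp

def InLine (line : String) : List String := (goA line.toList).map String.mk

-- ===== PORT B =====
-- Source B's loop body: state = (res, buf); buf = none means outside a group.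
def stepB (st : List (List Char) × Option (List Char)) (c : Char) :
    List (List Char) × Option (List Char) :=
  match st with
  | (res, none) => if c = '(' then (res, some []) else (res ++ [[c]], none)
  | (res, some b) => if c = ')' then (res ++ [b], none) else (res, some (b ++ [c]))

-- Source B's trailing 'if buf is not None: res.append(buf)'
def finB : List (List Char) × Option (List Char) → List (List Char)
  | (res, none) => res
  | (res, some b) => res ++ [b]

def InLine_alt (line : String) : List String :=
  (finB (line.toList.foldl stepB ([], none))).map String.mk

-- ===== PRECONDITION & SPEC =====
-- Pre_ excludes exactly the inputs on which A raises ValueError: some scanned '(' has no ')' at or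
-- after it (every such '(' is indeed reached by A's scan, since a '(' inside a group has the
-- group's closing ')' after it).
def Pre_InLine (line : String) : Prop :=
  ∀ t ∈ line.toList.tails, t.head? = some '(' → ')' ∈ t
instance (line : String) : Decidable (Pre_InLine line) := by unfold Pre_InLine; infer_instance

def pvWitness_InLine : String := "a(bc)d"

def Spec_InLine (line : String) (out : List String) : Prop := out = InLine_alt line
instance (line : String) (out : List String) : Decidable (Spec_InLine line out) := by unfold Spec_InLine; infer_instance

-- ===== CLAIM (what is proved, stated in full; the proofs are below) =====
def Claim_equal_InLine : Prop := ∀ (line : String), Dom_InLine line → Pre_InLine line → Spec_InLine line (InLine line)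

-- ===== LEMMAS AND PROOFS =====

-- direct recursive reading of B's loop, used only in the proofs
def goB : List Char → Option (List Char) → List (List Char)
  | [], none => []
  | [], some b => [b]
  | c :: rest, none => if c = '(' then goB rest (some []) else [c] :: goB rest none
  | c :: rest, some b => if c = ')' then b :: goB rest none else goB rest (some (b ++ [c]))

theorem finB_foldl (l : List Char) : ∀ (res : List (List Char)) (buf : Option (List Char)),
    finB (l.foldl stepB (res, buf)) = res ++ goB l buf := by
  induction l with
  | nil => intro res buf; cases buf <;> simp [finB, goB]
  | cons c rest ih =>
    intro res buf
    cases buf with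
    | none =>
      by_cases h : c = '(' <;> simp [stepB, goB, h, ih]
    | some b =>
      by_cases h : c = ')' <;> simp [stepB, goB, h, ih]

theorem goB_some (rest : List Char) : ∀ (b : List Char), ')' ∈ rest →
    goB rest (some b) =
      (b ++ rest.take (rest.idxOf ')')) :: goB (rest.drop (rest.idxOf ')' + 1)) none := by
  induction rest with
  | nil => intro b h; simp at h
  | cons c rest ih =>
    intro b h
    by_cases hc : c = ')'
    · subst hc; simp [goB, List.idxOf_cons_self]
    · have hmem : ')' ∈ rest := by
        rcases List.mem_cons.mp h with h' | h'
        · exact absurd h'.symm hc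
        · exact h'
      have hidx : (c :: rest).idxOf ')' = rest.idxOf ')' + 1 := by
        simp [hc]
      simp [goB, hc, ih _ hmem, hidx]

theorem pre_suffix {l t : List Char}
    (h : ∀ u ∈ l.tails, u.head? = some '(' → ')' ∈ u) (hs : t <:+ l) :
    ∀ u ∈ t.tails, u.head? = some '(' → ')' ∈ u := by
  intro u hu
  exact h u ((List.mem_tails _ _).mpr (((List.mem_tails _ _).mp hu).trans hs))

theorem goA_eq_goB : ∀ (n : ℕ) (l : List Char), l.length ≤ n →
    (∀ u ∈ l.tails, u.head? = some '(' → ')' ∈ u) → goA l = goB l none := by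
  intro n
  induction n with
  | zero =>
    intro l hl _
    have : l = [] := List.length_eq_zero_iff.mp (Nat.le_zero.mp hl)
    subst this; simp [goA, goB]
  | succ n ih =>
    intro l hl hpre
    match l with
    | [] => simp [goA, goB]
    | c :: rest =>
      by_cases hc : c = '('
      · subst hc
        have hmem : ')' ∈ ('(' :: rest) :=
          hpre _ ((List.mem_tails _ _).mpr (List.suffix_refl _)) rfl
        have hmem' : ')' ∈ rest := by
          rcases List.mem_cons.mp hmem with h' | h'
          · exact absurd h' (by decide)
          · exact h'
        have hdrop : (rest.drop (rest.idxOf ')' + 1)).length ≤ n := by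
          simp only [List.length_cons] at hl
          have := List.length_drop (l := rest) (i := rest.idxOf ')' + 1)
          omega
        have hpre' := pre_suffix hpre
          ((List.drop_suffix (rest.idxOf ')' + 1) rest).trans (List.suffix_cons _ _))
        rw [goA, goB]
        simp [hmem', goB_some rest [] hmem', ih _ hdrop hpre']
      · have hpre' := pre_suffix hpre (List.suffix_cons c rest)
        rw [goA, goB]
        simp only [if_neg hc, List.length_cons] at hl ⊢
        rw [ih rest (by omega) hpre']

-- ===== VERDICT (by name: the statement is the Claim_ definition above) =====
theorem InLine_spec : Claim_equal_InLine := by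
  intro line _ hpre
  unfold Spec_InLine InLine InLine_alt
  rw [finB_foldl, goA_eq_goB line.toList.length line.toList le_rfl hpre, List.nil_append]
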